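-- pv_equiv track=rewrite | github.com/sangwon5579/Coding_Test_Practice | 프로그래머스/0/181854. 배열의 길이에 따라 다른 연산하기/배열의 길이에 따라 다른 연산하기.py | solution
-- ===== SOURCE A (Python) =====
-- def solution(arr, n):
--     answer = []
--     a = len(arr)
--     if a % 2 != 0:
--         for i in range(a):
--             if i % 2 == 0:
--                 answer.append(arr[i] + n)
--             else:
--                 answer.append(arr[i])
--     else:
--         for i in range(a):
--             if i % 2 == 0:
--                 answer.append(arr[i])
--             else:
--                 answer.append(arr[i] + n)
--     return answer
-- ===== SOURCE B (Python) =====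
-- def solution(arr, n):
--     deltas = ([n, 0] if len(arr) % 2 else [0, n]) * ((len(arr) + 1) // 2)
--     return [x + d for x, d in zip(arr, deltas)]
-- ===== Notes on version B (the rewrite author's own statement) =====
-- stated objective: alternative
-- what changed: B precomputes a repeated [n,0]/[0,n] delta pattern and zips it with the array in one addition pass, replacing A's duplicated index loops with a per-element parity branch.
import Mathlib
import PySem

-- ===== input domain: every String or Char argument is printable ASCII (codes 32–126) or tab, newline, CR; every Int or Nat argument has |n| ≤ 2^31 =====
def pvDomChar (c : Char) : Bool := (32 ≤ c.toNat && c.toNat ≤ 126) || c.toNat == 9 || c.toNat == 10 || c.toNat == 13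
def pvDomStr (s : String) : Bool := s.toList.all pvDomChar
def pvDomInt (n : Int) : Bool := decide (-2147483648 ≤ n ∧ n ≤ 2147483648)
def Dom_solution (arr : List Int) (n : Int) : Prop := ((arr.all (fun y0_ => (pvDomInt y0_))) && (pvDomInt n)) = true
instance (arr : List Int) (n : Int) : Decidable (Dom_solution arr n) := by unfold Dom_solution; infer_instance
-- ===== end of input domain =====

-- B replaces A's two index loops (per-element parity branch) by a precomputed
-- repeated [n,0]/[0,n] delta pattern zipped with the array in one addition pass.

-- ===== PORT A =====
def solution (arr : List Int) (n : Int) : List Int :=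
  let a : Int := arr.length
  if a % 2 ≠ 0 then
    (PySem.List.pyRange 0 a 1).foldl
      (fun answer i =>
        if i % 2 == 0 then answer ++ [PySem.List.pyGetD arr i 0 + n]
        else answer ++ [PySem.List.pyGetD arr i 0]) []
  else
    (PySem.List.pyRange 0 a 1).foldl
      (fun answer i =>
        if i % 2 == 0 then answer ++ [PySem.List.pyGetD arr i 0]
        else answer ++ [PySem.List.pyGetD arr i 0 + n]) []

-- ===== PORT B =====
def solution_alt (arr : List Int) (n : Int) : List Int :=
  let deltas : List Int :=
    (List.replicate ((arr.length + 1) / 2)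
      (if arr.length % 2 = 1 then [n, 0] else [0, n])).flatten
  (arr.zip deltas).map (fun p => p.1 + p.2)

-- ===== PRECONDITION & SPEC =====
def Spec_solution (arr : List Int) (n : Int) (out : List Int) : Prop := out = solution_alt arr n
instance (arr : List Int) (n : Int) (out : List Int) : Decidable (Spec_solution arr n out) := by unfold Spec_solution; infer_instance

-- ===== CLAIM (what is proved, stated in full; the proofs are below) =====
def Claim_equal_solution : Prop := ∀ (arr : List Int) (n : Int), Dom_solution arr n → Spec_solution arr n (solution arr n)

-- ===== LEMMAS AND PROOFS =====

-- element k of m copies of a 2-element pattern is the pattern element at k % 2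
theorem flatten_replicate_pair_getElem (x y : Int) (m k : ℕ) (hk : k < 2 * m) :
    ((List.replicate m [x, y]).flatten)[k]'(by simp; omega) = if k % 2 = 0 then x else y := by
  induction m generalizing k with
  | zero => omega
  | succ m ih =>
    have he : (List.replicate (m + 1) [x, y]).flatten
        = x :: y :: (List.replicate m [x, y]).flatten := by
      simp [List.replicate_succ]
    simp only [he]
    match k with
    | 0 => simp
    | 1 => simp
    | (j + 2) =>
      have hj : j < 2 * m := by omega
      have := ih j hj
      simp only [List.getElem_cons_succ]
      rw [this]
      have : (j + 2) % 2 = j % 2 := by omega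
      rw [this]

-- A's foldl-with-append loop body, as a map over the index range
theorem loop_as_map (L : Int) (f g : Int → Int) :
    (PySem.List.pyRange 0 L 1).foldl
      (fun answer i => if i % 2 == 0 then answer ++ [f i] else answer ++ [g i]) []
    = (PySem.List.pyRange 0 L 1).map (fun i => if i % 2 == 0 then f i else g i) := by
  have hfun : (fun (answer : List Int) i =>
      if i % 2 == 0 then answer ++ [f i] else answer ++ [g i])
      = fun answer i => answer ++ [if i % 2 == 0 then f i else g i] := by
    funext a i; split <;> simp_all
  rw [hfun, PySem.List.foldl_append_singleton_eq_map]
  simp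

theorem deltas_len (arr : List Int) (n : Int) :
    ((List.replicate ((arr.length + 1) / 2)
      (if arr.length % 2 = 1 then [n, 0] else [0, n])).flatten).length
    = 2 * ((arr.length + 1) / 2) := by
  by_cases h : arr.length % 2 = 1 <;> simp [h] <;> omega

theorem alt_len (arr : List Int) (n : Int) :
    (solution_alt arr n).length = arr.length := by
  have := deltas_len arr n
  simp only [solution_alt, List.length_map, List.length_zip, this]
  omega

theorem deltas_getElem (arr : List Int) (n : Int) (k : ℕ) (hk : k < arr.length) :
    ((List.replicate ((arr.length + 1) / 2)
      (if arr.length % 2 = 1 then [n, 0] else [0, n])).flatten)[k]'(by rw [deltas_len]; omega)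
    = (if arr.length % 2 = 1 then (if k % 2 = 0 then n else 0)
       else (if k % 2 = 0 then 0 else n)) := by
  by_cases h : arr.length % 2 = 1 <;> simp only [h, ite_true, ite_false] <;>
    rw [flatten_replicate_pair_getElem _ _ _ k (by omega)]

theorem alt_getElem (arr : List Int) (n : Int) (k : ℕ) (hk : k < (solution_alt arr n).length) :
    (solution_alt arr n)[k]
    = arr[k]'(by rw [alt_len] at hk; exact hk)
      + (if arr.length % 2 = 1 then (if k % 2 = 0 then n else 0)
         else (if k % 2 = 0 then 0 else n)) := by
  have hkL : k < arr.length := by rw [alt_len] at hk; exact hk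
  simp only [solution_alt] at hk ⊢
  rw [List.getElem_map, List.getElem_zip]
  rw [deltas_getElem arr n k hkL]

theorem solution_spec0 (arr : List Int) (n : Int) :
    solution arr n = solution_alt arr n := by
  by_cases hpar : (arr.length : Int) % 2 ≠ 0
  case pos =>
    have hp : arr.length % 2 = 1 := by omega
    have hA : solution arr n = (PySem.List.pyRange 0 (arr.length : Int) 1).map
        (fun i => if i % 2 == 0 then PySem.List.pyGetD arr i 0 + n
                  else PySem.List.pyGetD arr i 0) := by
      unfold solution
      rw [if_pos hpar, loop_as_map]
    apply List.ext_getElem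
    · rw [hA, alt_len, List.length_map, PySem.List.length_pyRange_one]; omega
    · intro k hk1 hk2
      rw [hA] at hk1
      rw [List.getElem_of_eq hA]
      simp only [List.length_map, PySem.List.length_pyRange_one] at hk1
      have hkL : k < arr.length := by omega
      rw [List.getElem_map, PySem.List.getElem_pyRange_one, alt_getElem arr n k hk2]
      have hget : PySem.List.pyGetD arr ((0 : Int) + (k : Int)) 0 = arr[k]'hkL := by
        rw [zero_add, PySem.List.pyGetD_natCast]; simp [List.getD, hkL]
      rw [if_pos hp]
      by_cases hk : k % 2 = 0
      · have hb : (((0 : Int) + (k : Int)) % 2 == 0) = true := by simp; omega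
        rw [hb, if_pos rfl, if_pos hk, hget]
      · have hb : (((0 : Int) + (k : Int)) % 2 == 0) = false := by simp; omega
        rw [hb, if_neg (by simp), if_neg hk, hget, add_zero]
  case neg =>
    have hp : ¬ arr.length % 2 = 1 := by omega
    have hA : solution arr n = (PySem.List.pyRange 0 (arr.length : Int) 1).map
        (fun i => if i % 2 == 0 then PySem.List.pyGetD arr i 0
                  else PySem.List.pyGetD arr i 0 + n) := by
      unfold solution
      rw [if_neg hpar, loop_as_map]
    apply List.ext_getElem
    · rw [hA, alt_len, List.length_map, PySem.List.length_pyRange_one]; omega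
    · intro k hk1 hk2
      rw [hA] at hk1
      rw [List.getElem_of_eq hA]
      simp only [List.length_map, PySem.List.length_pyRange_one] at hk1
      have hkL : k < arr.length := by omega
      rw [List.getElem_map, PySem.List.getElem_pyRange_one, alt_getElem arr n k hk2]
      have hget : PySem.List.pyGetD arr ((0 : Int) + (k : Int)) 0 = arr[k]'hkL := by
        rw [zero_add, PySem.List.pyGetD_natCast]; simp [List.getD, hkL]
      rw [if_neg hp]
      by_cases hk : k % 2 = 0
      · have hb : (((0 : Int) + (k : Int)) % 2 == 0) = true := by simp; omega
        rw [hb, if_pos rfl, if_pos hk, hget, add_zero]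
      · have hb : (((0 : Int) + (k : Int)) % 2 == 0) = false := by simp; omega
        rw [hb, if_neg (by simp), if_neg hk, hget]

-- ===== VERDICT (by name: the statement is the Claim_ definition above) =====
theorem solution_spec : Claim_equal_solution := by
  intro arr n _
  unfold Spec_solution
  exact solution_spec0 arr n
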